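-- pv_equiv track=rewrite | github.com/MiguelKauadePietro/CAP_2 | Python_parte1/lista_2/menorPositivo.py | menor_positivo
-- ===== SOURCE A (Python) =====
-- def menor_positivo(valores):
--     n = len(valores)
--
--     menor = 0
--
--     for i in range(n):
--         if valores[i] > menor:
--             menor = valores[i]
--
--     for i in range(n):
--         if valores[i] > 0 and valores[i] < menor:
--             menor = valores[i]
--
--     return menor
-- ===== SOURCE B (Python) =====
-- def menor_positivo(valores):
--     best = None
--     for v in valores:
--         if v > 0 and (best is None or v < best):
--             best = v
--     return best if best is not None else 0
-- ===== Notes on version B (the rewrite author's own statement) =====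
-- stated objective: simpler
-- what changed: Single pass maintaining an optional current smallest positive, instead of A's two passes (first computing the maximum, then minimising positives below it).
import Mathlib
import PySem

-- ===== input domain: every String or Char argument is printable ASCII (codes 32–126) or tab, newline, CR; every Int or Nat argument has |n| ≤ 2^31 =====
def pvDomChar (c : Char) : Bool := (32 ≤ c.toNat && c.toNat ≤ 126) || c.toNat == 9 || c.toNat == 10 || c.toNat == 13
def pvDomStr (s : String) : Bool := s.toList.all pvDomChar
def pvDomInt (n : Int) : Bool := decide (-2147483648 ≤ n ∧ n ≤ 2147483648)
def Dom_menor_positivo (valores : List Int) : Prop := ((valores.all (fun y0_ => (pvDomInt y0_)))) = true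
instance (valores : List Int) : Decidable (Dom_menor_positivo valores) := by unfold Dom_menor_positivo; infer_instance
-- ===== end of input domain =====

-- B replaces A's two passes (max pass, then min-positive pass) by one pass with an optional best; objective: simpler.


-- ===== PORT A =====
-- first loop: menor = running max (started at 0); second loop: take positives below menor
def menor_positivo (valores : List Int) : Int :=
  let menor := valores.foldl (fun menor v => if menor < v then v else menor) 0
  valores.foldl (fun menor v => if 0 < v ∧ v < menor then v else menor) menor

-- ===== PORT B =====
-- one pass: best : Option Int holds the smallest positive seen so far
def stepB (best : Option Int) (v : Int) : Option Int :=
  match best with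
  | none => if 0 < v then some v else none
  | some x => if 0 < v ∧ v < x then some v else some x

def menor_positivo_alt (valores : List Int) : Int :=
  (valores.foldl stepB (none : Option Int)).getD 0

-- ===== PRECONDITION & SPEC =====
def Spec_menor_positivo (valores : List Int) (out : Int) : Prop := out = menor_positivo_alt valores
instance (valores : List Int) (out : Int) : Decidable (Spec_menor_positivo valores out) := by unfold Spec_menor_positivo; infer_instance

-- ===== CLAIM (what is proved, stated in full; the proofs are below) =====
def Claim_equal_menor_positivo : Prop := ∀ (valores : List Int), Dom_menor_positivo valores → Spec_menor_positivo valores (menor_positivo valores)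

-- ===== LEMMAS AND PROOFS =====

-- A's first loop is foldl max
theorem pass1_eq_max (l : List Int) (m : Int) :
    l.foldl (fun menor v => if menor < v then v else menor) m = l.foldl max m := by
  induction l generalizing m with
  | nil => rfl
  | cons h t ih =>
    simp only [List.foldl_cons, ih]
    congr 1
    rw [max_def]; split_ifs <;> omega

theorem le_foldl_max (l : List Int) (a : Int) : a ≤ l.foldl max a := by
  induction l generalizing a with
  | nil => simp
  | cons h t ih => exact le_trans (le_max_left a h) (ih _)

theorem mem_le_foldl_max (l : List Int) (a v : Int) (hv : v ∈ l) : v ≤ l.foldl max a := by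
  induction l generalizing a with
  | nil => cases hv
  | cons h t ih =>
    rcases List.mem_cons.mp hv with rfl | hm
    · exact le_trans (le_max_right a v) (le_foldl_max t _)
    · exact ih _ hm

-- A's second loop, from a positive start, is foldl min over the positive elements
theorem pass2_eq_min (l : List Int) (m : Int) (hm : 0 < m) :
    l.foldl (fun menor v => if 0 < v ∧ v < menor then v else menor) m
      = (l.filter (fun v => decide (0 < v))).foldl min m := by
  induction l generalizing m with
  | nil => rfl
  | cons h t ih =>
    by_cases hp : 0 < h
    · have hfil : (h :: t).filter (fun v => decide (0 < v))
          = h :: t.filter (fun v => decide (0 < v)) := by simp [hp]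
      rw [hfil]
      simp only [List.foldl_cons]
      have hstep : (if 0 < h ∧ h < m then h else m) = min m h := by
        rw [min_def]; split_ifs <;> omega
      rw [hstep, ih _ (by rw [min_def]; split_ifs <;> omega)]
    · have hfil : (h :: t).filter (fun v => decide (0 < v))
          = t.filter (fun v => decide (0 < v)) := by simp [hp]
      rw [hfil]
      simp only [List.foldl_cons, if_neg (by tauto : ¬(0 < h ∧ h < m))]
      exact ih _ hm

-- A's second loop does nothing when no element is positive
theorem pass2_no_pos (l : List Int) (m : Int) (h : ∀ v ∈ l, ¬ 0 < v) :
    l.foldl (fun menor v => if 0 < v ∧ v < menor then v else menor) m = m := by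
  induction l generalizing m with
  | nil => rfl
  | cons hd t ih =>
    rw [List.foldl_cons,
      if_neg (fun hc : 0 < hd ∧ hd < m => h hd List.mem_cons_self hc.1)]
    exact ih _ (fun v hv => h v (List.mem_cons_of_mem _ hv))

-- A's first loop stays at 0 when no element is positive
theorem pass1_no_pos (l : List Int) (h : ∀ v ∈ l, ¬ 0 < v) :
    l.foldl (fun menor v => if menor < v then v else menor) 0 = 0 := by
  induction l with
  | nil => rfl
  | cons hd t ih =>
    simp only [List.foldl_cons,
      if_neg (fun hc => h hd (List.mem_cons_self) (lt_of_le_of_lt (le_refl 0) hc))]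
    exact ih (fun v hv => h v (List.mem_cons_of_mem _ hv))

-- merge step used only in the proofs
def stepM (best : Option Int) (v : Int) : Option Int :=
  match best with
  | none => some v
  | some x => some (min x v)

theorem stepB_none (v : Int) : stepB none v = if 0 < v then some v else none := rfl
theorem stepB_some (x v : Int) :
    stepB (some x) v = if 0 < v ∧ v < x then some v else some x := rfl
theorem stepM_none (v : Int) : stepM none v = some v := rfl
theorem stepM_some (x v : Int) : stepM (some x) v = some (min x v) := rfl

-- B's fold equals a plain merge fold over the positive elements
theorem foldB_eq_filter (l : List Int) (b : Option Int) :
    l.foldl stepB b = (l.filter (fun v => decide (0 < v))).foldl stepM b := by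
  induction l generalizing b with
  | nil => rfl
  | cons h t ih =>
    by_cases hp : 0 < h
    · rw [List.filter_cons_of_pos (by simpa using hp)]
      cases b with
      | none =>
        rw [List.foldl_cons, List.foldl_cons, stepB_none, stepM_none, if_pos hp]
        exact ih (some h)
      | some x =>
        rw [List.foldl_cons, List.foldl_cons, stepB_some, stepM_some]
        have h1 : (if 0 < h ∧ h < x then some h else some x) = some (min x h) := by
          rw [min_def]; split_ifs <;> simp_all <;> omega
        rw [h1]; exact ih (some (min x h))
    · rw [List.filter_cons_of_neg (by simpa using hp)]
      cases b with
      | none =>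
        rw [List.foldl_cons, stepB_none, if_neg hp]
        exact ih none
      | some x =>
        rw [List.foldl_cons, stepB_some, if_neg (fun hc : 0 < h ∧ h < x => hp hc.1)]
        exact ih (some x)

theorem foldM_some (l : List Int) (x : Int) :
    l.foldl stepM (some x) = some (l.foldl min x) := by
  induction l generalizing x with
  | nil => rfl
  | cons h t ih => rw [List.foldl_cons, stepM_some, ih, List.foldl_cons]

-- ===== VERDICT (by name: the statement is the Claim_ definition above) =====
theorem menor_positivo_spec : Claim_equal_menor_positivo := by
  intro valores _
  unfold Spec_menor_positivo menor_positivo menor_positivo_alt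
  simp only
  rcases hf : valores.filter (fun v => decide (0 < v)) with _ | ⟨p, ps⟩
  · have hnp : ∀ v ∈ valores, ¬ 0 < v := by
      intro v hv hp
      have : v ∈ valores.filter (fun v => decide (0 < v)) := by
        simp [List.mem_filter, hv, hp]
      rw [hf] at this; cases this
    rw [pass1_no_pos _ hnp, pass2_no_pos _ _ hnp, foldB_eq_filter, hf]
    rfl
  · have hpmem : p ∈ valores.filter (fun v => decide (0 < v)) := by
      rw [hf]; exact List.mem_cons_self
    have hppos : 0 < p := by
      have := (List.mem_filter.mp hpmem).2; simpa using this
    have hpval : p ∈ valores := (List.mem_filter.mp hpmem).1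
    set M := valores.foldl (fun menor v => if menor < v then v else menor) 0 with hM
    have hMmax : M = valores.foldl max 0 := pass1_eq_max _ _
    have hpM : p ≤ M := by rw [hMmax]; exact mem_le_foldl_max _ _ _ hpval
    have hMpos : 0 < M := lt_of_lt_of_le hppos hpM
    rw [pass2_eq_min _ _ hMpos, foldB_eq_filter, hf, List.foldl_cons, List.foldl_cons,
      stepM_none, foldM_some, min_eq_right hpM]
    rfl
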